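-- pv_equiv track=rewrite | github.com/ProMeX04/DSA-PTIT | DSA10012.py | bfs
-- ===== SOURCE A (Python) =====
-- from collections import defaultdict, deque
--
-- def bfs(adj, root):
--     queue = deque([(root, 1)])
--     res = defaultdict(int)
--     res [root] = 1
--     while queue:
--         top, exp = queue.popleft()
--         for i in adj[top]:
--             if not res[i]:
--                 res[i]= exp + 1
--                 queue.append((i, exp + 1))
--     return sum(res.values())
-- ===== SOURCE B (Python) =====
-- def bfs(adj, root):
--     visited = {root}
--     frontier = [root]
--     level = 1
--     total = 0
--     while frontier:
--         total += level * len(frontier)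
--         nxt = []
--         for node in frontier:
--             for i in adj[node]:
--                 if i not in visited:
--                     visited.add(i)
--                     nxt.append(i)
--         frontier = nxt
--         level += 1
--     return total
-- ===== Notes on version B (the rewrite author's own statement) =====
-- stated objective: alternative
-- what changed: Replaced the node-at-a-time deque+defaultdict BFS that stores a level per node and sums them at the end by a level-synchronous BFS that keeps a visited set and a frontier list and adds level*len(frontier) per layer, never materialising per-node levels.
import Mathlib
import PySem

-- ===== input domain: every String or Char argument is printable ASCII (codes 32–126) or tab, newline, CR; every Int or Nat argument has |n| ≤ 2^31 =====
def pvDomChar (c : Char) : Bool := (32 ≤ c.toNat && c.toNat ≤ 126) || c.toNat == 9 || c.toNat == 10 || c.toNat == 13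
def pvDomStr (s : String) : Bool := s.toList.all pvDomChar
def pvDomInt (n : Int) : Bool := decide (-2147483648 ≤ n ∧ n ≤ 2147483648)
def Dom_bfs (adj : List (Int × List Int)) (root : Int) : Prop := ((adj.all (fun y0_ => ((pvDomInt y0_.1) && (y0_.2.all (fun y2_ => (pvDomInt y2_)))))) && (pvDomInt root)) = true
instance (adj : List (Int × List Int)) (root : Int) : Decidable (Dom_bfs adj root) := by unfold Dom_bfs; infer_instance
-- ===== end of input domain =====

-- B replaces A's node-at-a-time queue BFS (per-node levels stored in a dict, summed at the end)
-- by a level-synchronous BFS accumulating level * |frontier| per layer (objective: alternative).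

-- ===== PORT A =====
-- A's while loop over the deque; the Nat argument is a fuel guard for Lean's termination
-- checker (bfs passes more fuel than the loop can ever consume on inputs in Pre_bfs).
def bfsLoop (adj : List (Int × List Int)) : Nat → List (Int × Int) → PySem.Dict Int Int → Int
  | _, [], res => res.values.sum                      -- queue empty: return sum(res.values())
  | 0, _ :: _, res => res.values.sum                  -- fuel guard only
  | f + 1, (top, exp) :: rest, res =>
    match (PySem.Dict.mk adj).get? top with
    | none => 0                                       -- Python raises KeyError here (outside Pre_bfs)
    | some lst =>
      -- for i in adj[top]: if not res[i]: res[i] = exp+1; queue.append((i, exp+1))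
      let st := lst.foldl (fun (st : List (Int × Int) × PySem.Dict Int Int) i =>
        if st.2.getD i 0 = 0 then (st.1 ++ [(i, exp + 1)], st.2.insert i (exp + 1)) else st)
        (rest, res)
      bfsLoop adj f st.1 st.2

def bfs (adj : List (Int × List Int)) (root : Int) : Int :=
  bfsLoop adj (((adj.map Prod.snd).flatten).length + 1) [(root, 1)]
    ((PySem.Dict.empty).insert root 1)

-- ===== PORT B =====
-- for i in adj[node]: if i not in visited: visited.add(i); nxt.append(i)
def nbrsLoop (lst : List Int) (st : List Int × List Int) : List Int × List Int :=
  lst.foldl (fun (st : List Int × List Int) i =>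
    if PySem.Set.contains st.1 i then st else (PySem.Set.add st.1 i, st.2 ++ [i])) st

-- for node in frontier: … adj[node] … ; none = Python's KeyError (outside Pre_bfs)
def frontLoop (adj : List (Int × List Int)) : List Int → (List Int × List Int) → Option (List Int × List Int)
  | [], st => some st
  | c :: t, st =>
    match (PySem.Dict.mk adj).get? c with
    | none => none
    | some lst => frontLoop adj t (nbrsLoop lst st)

-- B's while loop; Nat argument is a fuel guard for termination only
def altLoop (adj : List (Int × List Int)) : Nat → List Int → List Int → Int → Int → Int
  | _, [], _, _, total => total
  | 0, _ :: _, _, _, total => total                   -- fuel guard only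
  | g + 1, c :: t, vis, lvl, total =>
    let total' := total + lvl * (((c :: t).length : Nat) : Int)
    match frontLoop adj (c :: t) (vis, []) with
    | none => 0                                       -- KeyError (outside Pre_bfs)
    | some (vis', nxt) => altLoop adj g nxt vis' (lvl + 1) total'

def bfs_alt (adj : List (Int × List Int)) (root : Int) : Int :=
  altLoop adj (((adj.map Prod.snd).flatten).length + 1) [root] (PySem.Set.ofList [root]) 1 0

-- ===== PRECONDITION & SPEC =====
-- all neighbour-list entries of the nodes of S (a missing key contributes nothing)
def adjNbrs (adj : List (Int × List Int)) (S : List Int) : List Int :=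
  (S.map (fun c => ((PySem.Dict.mk adj).get? c).getD [])).flatten

-- one closure step: S together with all neighbours of S
def reachStep (adj : List (Int × List Int)) (S : List Int) : List Int :=
  PySem.Set.update S (adjNbrs adj S)

def reachN (adj : List (Int × List Int)) : Nat → List Int → List Int
  | 0, S => S
  | n + 1, S => reachN adj n (reachStep adj S)

-- the nodes reachable from root (the iteration count is enough for the closure to stabilise)
def reachSet (adj : List (Int × List Int)) (root : Int) : List Int :=
  reachN adj (((adj.map Prod.snd).flatten).length + 1) (PySem.Set.ofList [root])

-- Pre_bfs: every node reachable from root is a key of adj — exactly the inputs on which every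
-- adj[...] lookup A performs succeeds (on any other input Python A raises KeyError).
def Pre_bfs (adj : List (Int × List Int)) (root : Int) : Prop :=
  ∀ i ∈ reachSet adj root, i ∈ adj.map Prod.fst
instance (adj : List (Int × List Int)) (root : Int) : Decidable (Pre_bfs adj root) := by
  unfold Pre_bfs; infer_instance

def pvWitness_bfs : (List (Int × List Int)) × Int := ([(1, [2, 3]), (2, [1]), (3, [])], 1)

def Spec_bfs (adj : List (Int × List Int)) (root : Int) (out : Int) : Prop := out = bfs_alt adj root
instance (adj : List (Int × List Int)) (root : Int) (out : Int) : Decidable (Spec_bfs adj root out) := by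
  unfold Spec_bfs; infer_instance

-- ===== CLAIM (what is proved, stated in full; the proofs are below) =====
def Claim_equal_bfs : Prop := ∀ (adj : List (Int × List Int)) (root : Int),
  Dom_bfs adj root → Pre_bfs adj root → Spec_bfs adj root (bfs adj root)

-- ===== LEMMAS AND PROOFS =====

-- the new (not yet visited) nodes contributed by one adjacency list, in discovery order
def news : List Int → List Int → List Int
  | _, [] => []
  | vis, i :: t => if i ∈ vis then news vis t else i :: news (vis ++ [i]) t

def aget (adj : List (Int × List Int)) (c : Int) : List Int :=
  ((PySem.Dict.mk adj).get? c).getD []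

-- the new nodes contributed by a whole frontier
def lnews (adj : List (Int × List Int)) : List Int → List Int → List Int
  | _, [] => []
  | vis, c :: t =>
    let δ := news vis (aget adj c)
    δ ++ lnews adj (vis ++ δ) t

-- correspondence between A's dict res and B's visited set
def ResVis (res : PySem.Dict Int Int) (vis : List Int) : Prop :=
  ∀ i : Int, (res.contains i = decide (i ∈ vis)) ∧ (i ∈ vis → res.getD i 0 ≠ 0)

-- number of listed nodes not yet visited (the decreasing measure)
def uv (adj : List (Int × List Int)) (vis : List Int) : Nat :=
  ((PySem.Set.ofList ((adj.map Prod.snd).flatten)).filter (fun n => decide (n ∉ vis))).length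

theorem news_mem : ∀ (lst vis : List Int) (x : Int), x ∈ news vis lst → x ∈ lst ∧ x ∉ vis := by
  intro lst
  induction lst with
  | nil => intro vis x h; simp [news] at h
  | cons i t ih =>
    intro vis x h
    by_cases hi : i ∈ vis
    · rw [news, if_pos hi] at h
      obtain ⟨h1, h2⟩ := ih vis x h
      exact ⟨List.mem_cons_of_mem _ h1, h2⟩
    · rw [news, if_neg hi] at h
      rcases List.mem_cons.1 h with rfl | h'
      · exact ⟨List.mem_cons_self, hi⟩
      · obtain ⟨h1, h2⟩ := ih (vis ++ [i]) x h'
        simp only [List.mem_append, List.mem_singleton, not_or] at h2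
        exact ⟨List.mem_cons_of_mem _ h1, h2.1⟩

theorem news_nodup : ∀ (lst vis : List Int), (news vis lst).Nodup := by
  intro lst
  induction lst with
  | nil => intro vis; simp [news]
  | cons i t ih =>
    intro vis
    by_cases hi : i ∈ vis
    · rw [news, if_pos hi]; exact ih vis
    · rw [news, if_neg hi]
      refine List.Nodup.cons (fun hmem => ?_) (ih (vis ++ [i]))
      have := (news_mem t (vis ++ [i]) i hmem).2
      simp at this

theorem nbrsLoop_eq : ∀ (lst vis nxt : List Int),
    nbrsLoop lst (vis, nxt) = (vis ++ news vis lst, nxt ++ news vis lst) := by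
  intro lst
  induction lst with
  | nil => intro vis nxt; simp [nbrsLoop, news]
  | cons i t ih =>
    intro vis nxt
    have step : nbrsLoop (i :: t) (vis, nxt)
        = nbrsLoop t (if PySem.Set.contains vis i then (vis, nxt)
            else (PySem.Set.add vis i, nxt ++ [i])) := rfl
    by_cases hi : i ∈ vis
    · have hc : PySem.Set.contains vis i = true := (PySem.Set.contains_iff vis i).2 hi
      rw [step, hc, if_pos rfl, news, if_pos hi]
      exact ih vis nxt
    · have hc : PySem.Set.contains vis i = false := by
        rw [Bool.eq_false_iff]; intro h; exact hi ((PySem.Set.contains_iff vis i).1 h)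
      have hadd : PySem.Set.add vis i = vis ++ [i] := PySem.Set.add_of_not_mem hi
      rw [step, hc, news, if_neg hi, hadd]
      simp only [Bool.false_eq_true, if_false]
      rw [ih (vis ++ [i]) (nxt ++ [i])]
      simp

theorem lnews_mem (adj : List (Int × List Int)) : ∀ (cur vis : List Int) (x : Int), x ∈ lnews adj vis cur →
    (∃ c ∈ cur, x ∈ aget adj c) ∧ x ∉ vis := by
  intro cur
  induction cur with
  | nil => intro vis x h; simp [lnews] at h
  | cons c t ih =>
    intro vis x h
    simp only [lnews] at h
    rcases List.mem_append.1 h with h1 | h2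
    · obtain ⟨hx, hnv⟩ := news_mem _ _ _ h1
      exact ⟨⟨c, List.mem_cons_self, hx⟩, hnv⟩
    · obtain ⟨⟨c', hc', hx⟩, hnv⟩ := ih _ _ h2
      simp only [List.mem_append, not_or] at hnv
      exact ⟨⟨c', List.mem_cons_of_mem _ hc', hx⟩, hnv.1⟩

theorem lnews_nodup (adj : List (Int × List Int)) : ∀ (cur vis : List Int), (lnews adj vis cur).Nodup := by
  intro cur
  induction cur with
  | nil => intro vis; simp [lnews]
  | cons c t ih =>
    intro vis
    simp only [lnews]
    refine List.Nodup.append (news_nodup _ _) (ih _) ?_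
    intro x hx hx2
    have := (lnews_mem adj t (vis ++ news vis (aget adj c)) x hx2).2
    exact this (List.mem_append_right _ hx)

theorem frontLoop_eq (adj : List (Int × List Int)) (cur : List Int) (vis nxt : List Int)
    (h : ∀ c ∈ cur, (PySem.Dict.mk adj).contains c = true) :
    frontLoop adj cur (vis, nxt) = some (vis ++ lnews adj vis cur, nxt ++ lnews adj vis cur) := by
  induction cur generalizing vis nxt with
  | nil => simp [frontLoop, lnews]
  | cons c t ih =>
    have hc := h c List.mem_cons_self
    rw [PySem.Dict.contains_eq_isSome_get?] at hc
    obtain ⟨l, hl⟩ := Option.isSome_iff_exists.1 hc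
    have hag : aget adj c = l := by simp [aget, hl]
    rw [frontLoop, hl]
    show frontLoop adj t (nbrsLoop l (vis, nxt)) = _
    rw [nbrsLoop_eq l vis nxt, ← hag]
    rw [ih (vis ++ news vis (aget adj c)) (nxt ++ news vis (aget adj c))
      (fun c hc => h c (List.mem_cons_of_mem _ hc))]
    simp only [lnews, List.append_assoc]

theorem innerA_eq : ∀ (lst vis : List Int) (res : PySem.Dict Int Int) (q : List (Int × Int)) (e : Int),
    ResVis res vis → e + 1 ≠ 0 →
    ∃ res',
      lst.foldl (fun (st : List (Int × Int) × PySem.Dict Int Int) i =>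
          if st.2.getD i 0 = 0 then (st.1 ++ [(i, e + 1)], st.2.insert i (e + 1)) else st) (q, res)
        = (q ++ (news vis lst).map (fun i => (i, e + 1)), res')
      ∧ ResVis res' (vis ++ news vis lst)
      ∧ res'.values.sum = res.values.sum + (e + 1) * ((news vis lst).length : Int) := by
  intro lst
  induction lst with
  | nil =>
    intro vis res q e hinv _
    exact ⟨res, by simp [news], by simpa [news] using hinv, by simp [news]⟩
  | cons i t ih =>
    intro vis res q e hinv he
    by_cases hi : i ∈ vis
    · have hne : res.getD i 0 ≠ 0 := (hinv i).2 hi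
      simp only [List.foldl_cons, if_neg hne]
      rw [news, if_pos hi]
      exact ih vis res q e hinv he
    · have hcon : res.contains i = false := by
        rw [(hinv i).1]; simp [hi]
      have h0 : res.getD i 0 = 0 := PySem.Dict.getD_of_not_contains res 0 hcon
      simp only [List.foldl_cons, if_pos h0]
      have hinv' : ResVis (res.insert i (e + 1)) (vis ++ [i]) := by
        intro j
        refine ⟨?_, ?_⟩
        · rw [PySem.Dict.contains_insert, (hinv j).1]
          by_cases hj : j = i
          · subst hj; simp
          · simp [hj]
        · intro hj
          rw [PySem.Dict.getD_insert]
          by_cases hji : j = i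
          · simpa [hji] using he
          · have hjv : j ∈ vis := by
              rcases List.mem_append.1 hj with h | h
              · exact h
              · exact absurd (List.mem_singleton.1 h) hji
            simpa [hji] using (hinv j).2 hjv
      have hvals : (res.insert i (e + 1)).values = res.values ++ [e + 1] := by
        simp [PySem.Dict.values, PySem.Dict.items_insert_of_not_contains res (e+1) hcon]
      obtain ⟨res', h1, h2, h3⟩ := ih (vis ++ [i]) (res.insert i (e + 1)) (q ++ [(i, e + 1)]) e hinv' he
      rw [news, if_neg hi]
      refine ⟨res', ?_, ?_, ?_⟩
      · rw [h1]; simp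
      · simpa [List.append_assoc] using h2
      · rw [h3, hvals]
        simp only [List.sum_append, List.sum_cons, List.sum_nil, List.length_cons]
        push_cast
        ring

theorem filter_split : ∀ (U vis δ : List Int), (∀ x ∈ δ, x ∉ vis) →
    (U.filter (fun n => decide (n ∉ vis))).length =
      (U.filter (fun n => decide (n ∉ vis ++ δ))).length + (U.filter (fun n => decide (n ∈ δ))).length := by
  intro U vis δ hdis
  induction U with
  | nil => simp
  | cons u U ih =>
    simp only [List.filter_cons]
    by_cases hd : u ∈ δ
    · have hv : u ∉ vis := hdis u hd
      have e1 : decide (u ∉ vis) = true := by simp [hv]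
      have e2 : decide (u ∉ vis ++ δ) = false := by simp [List.mem_append, hd]
      have e3 : decide (u ∈ δ) = true := by simp [hd]
      rw [e1, e2, e3]
      simp only [Bool.false_eq_true, if_true, if_false, List.length_cons]
      omega
    · by_cases hv : u ∈ vis
      · have e1 : decide (u ∉ vis) = false := by simp [hv]
        have e2 : decide (u ∉ vis ++ δ) = false := by simp [List.mem_append, hv]
        have e3 : decide (u ∈ δ) = false := by simp [hd]
        rw [e1, e2, e3]
        simp only [Bool.false_eq_true, if_false]
        exact ih
      · have e1 : decide (u ∉ vis) = true := by simp [hv]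
        have e2 : decide (u ∉ vis ++ δ) = true := by simp [List.mem_append, hv, hd]
        have e3 : decide (u ∈ δ) = false := by simp [hd]
        rw [e1, e2, e3]
        simp only [Bool.false_eq_true, if_true, if_false, List.length_cons]
        omega

theorem get?_mk_mem : ∀ (adj : List (Int × List Int)) (k : Int) (l : List Int),
    (PySem.Dict.mk adj).get? k = some l → l ∈ adj.map Prod.snd := by
  intro adj
  induction adj with
  | nil => intro k l h; simp [PySem.Dict.get?] at h
  | cons p rest ih =>
    intro k l h
    obtain ⟨a, b⟩ := p
    rw [PySem.Dict.get?_mk_cons] at h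
    by_cases hk : a == k
    · rw [if_pos hk] at h
      simp only [Option.some.injEq] at h
      subst h
      exact List.mem_cons_self
    · rw [if_neg hk] at h
      exact List.mem_cons_of_mem _ (ih k l h)

theorem mem_adjNbrs_flatten (adj : List (Int × List Int)) (S : List Int) (x : Int)
    (h : x ∈ adjNbrs adj S) : x ∈ (adj.map Prod.snd).flatten := by
  obtain ⟨l', hl', hx⟩ := List.mem_flatten.1 h
  obtain ⟨c, _, hfc⟩ := List.mem_map.1 hl'
  rcases hg : (PySem.Dict.mk adj).get? c with _ | l
  · rw [← hfc, hg] at hx; simp at hx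
  · rw [← hfc, hg] at hx
    exact List.mem_flatten.2 ⟨l, get?_mk_mem adj c l hg, by simpa using hx⟩

theorem reachStep_eq_self (adj : List (Int × List Int)) (S : List Int)
    (h : ∀ x ∈ adjNbrs adj S, x ∈ S) : reachStep adj S = S := by
  rw [reachStep, PySem.Set.update_eq_append_filter]
  have hnil : List.filter (fun y => !PySem.Set.contains S y) (PySem.Set.ofList (adjNbrs adj S)) = [] := by
    rw [List.filter_eq_nil_iff]
    intro a ha
    have : a ∈ S := h a ((PySem.Set.mem_ofList _ _).1 ha)
    simp [this]
  rw [hnil, List.append_nil]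

theorem reachN_fix (adj : List (Int × List Int)) : ∀ (n : Nat) (S : List Int),
    reachStep adj S = S → reachN adj n S = S := by
  intro n
  induction n with
  | zero => intro S _; rfl
  | succ n ih => intro S h; rw [reachN, h]; exact ih S h

theorem subset_reachN (adj : List (Int × List Int)) : ∀ (n : Nat) (S : List Int),
    S ⊆ reachN adj n S := by
  intro n
  induction n with
  | zero => intro S; exact fun _ h => h
  | succ n ih =>
    intro S x hx
    rw [reachN]
    exact ih (reachStep adj S) ((PySem.Set.mem_update _ _ _).2 (Or.inl hx))

theorem reachN_closed (adj : List (Int × List Int)) (U : List Int)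
    (hUf : ∀ x ∈ (adj.map Prod.snd).flatten, x ∈ U) : ∀ (n : Nat) (S : List Int),
    S.Nodup → (∀ x ∈ S, x ∈ U) → U.length ≤ S.length + n →
    reachStep adj (reachN adj n S) = reachN adj n S := by
  intro n
  induction n with
  | zero =>
    intro S hnd hsub hlen
    show reachStep adj S = S
    apply reachStep_eq_self
    intro x hx
    by_contra hxS
    have hnd' : (x :: S).Nodup := List.nodup_cons.2 ⟨hxS, hnd⟩
    have hsub' : (x :: S) ⊆ U := by
      intro y hy
      rcases List.mem_cons.1 hy with rfl | hyS
      · exact hUf y (mem_adjNbrs_flatten adj S y hx)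
      · exact hsub y hyS
    have := (List.subperm_of_subset hnd' hsub').length_le
    simp only [List.length_cons] at this
    omega
  | succ n ih =>
    intro S hnd hsub hlen
    show reachStep adj (reachN adj n (reachStep adj S)) = reachN adj n (reachStep adj S)
    by_cases hfix : reachStep adj S = S
    · rw [hfix, reachN_fix adj n S hfix]
      exact hfix
    · have hstep := PySem.Set.update_eq_append_filter S (adjNbrs adj S)
      have hlen' : S.length + 1 ≤ (reachStep adj S).length := by
        rcases hflt : List.filter (fun y => !PySem.Set.contains S y) (PySem.Set.ofList (adjNbrs adj S)) with _ | ⟨a, l⟩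
        · exact absurd (by rw [reachStep, hstep, hflt, List.append_nil]) hfix
        · rw [reachStep, hstep, hflt]
          simp
      refine ih (reachStep adj S) (PySem.Set.nodup_update S _ hnd) ?_ (by omega)
      intro x hx
      rcases (PySem.Set.mem_update _ _ _).1 hx with hxS | hxN
      · exact hsub x hxS
      · exact hUf x (mem_adjNbrs_flatten adj S x hxN)

theorem reachSet_closed (adj : List (Int × List Int)) (root : Int) :
    ∀ c ∈ reachSet adj root, ∀ i ∈ aget adj c, i ∈ reachSet adj root := by
  have h := reachN_closed adj (root :: (adj.map Prod.snd).flatten)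
    (fun x hx => List.mem_cons_of_mem _ hx)
    (((adj.map Prod.snd).flatten).length + 1) (PySem.Set.ofList [root])
    (PySem.Set.nodup_ofList _)
    (by intro x hx; rw [PySem.Set.mem_ofList] at hx; simp only [List.mem_singleton] at hx
        subst hx; exact List.mem_cons_self)
    (by simp [PySem.Set.ofList])
  intro c hc i hi
  have hN : i ∈ adjNbrs adj (reachSet adj root) := by
    refine List.mem_flatten.2 ⟨aget adj c, List.mem_map.2 ⟨c, hc, rfl⟩, hi⟩
  have : i ∈ reachStep adj (reachSet adj root) :=
    (PySem.Set.mem_update _ _ _).2 (Or.inr hN)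
  rwa [show reachStep adj (reachSet adj root) = reachSet adj root from h] at this

theorem root_mem_reachSet (adj : List (Int × List Int)) (root : Int) :
    root ∈ reachSet adj root :=
  subset_reachN adj _ _ (by simp [PySem.Set.ofList])

theorem uv_drop (adj : List (Int × List Int)) (vis δ : List Int) (hnd : δ.Nodup)
    (hdis : ∀ x ∈ δ, x ∉ vis) (hin : ∀ x ∈ δ, x ∈ (adj.map Prod.snd).flatten) :
    uv adj (vis ++ δ) + δ.length ≤ uv adj vis := by
  have hU : (PySem.Set.ofList ((adj.map Prod.snd).flatten)).Nodup := PySem.Set.nodup_ofList _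
  have hsplit := filter_split (PySem.Set.ofList ((adj.map Prod.snd).flatten)) vis δ hdis
  have hlen : ((PySem.Set.ofList ((adj.map Prod.snd).flatten)).filter (fun n => decide (n ∈ δ))).length = δ.length := by
    have hperm : ((PySem.Set.ofList ((adj.map Prod.snd).flatten)).filter (fun n => decide (n ∈ δ))).Perm δ := by
      rw [List.perm_ext_iff_of_nodup (List.Nodup.filter _ hU) hnd]
      intro a
      simp only [List.mem_filter, decide_eq_true_eq]
      constructor
      · exact fun h => h.2
      · exact fun h => ⟨(PySem.Set.mem_ofList _ _).2 (hin a h), h⟩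
    exact hperm.length_eq
  unfold uv
  omega

theorem levelA_eq (adj : List (Int × List Int)) : ∀ (cur acc vis : List Int)
    (res : PySem.Dict Int Int) (e : Int) (f : Nat),
    ResVis res vis → 1 ≤ e → (∀ c ∈ cur, (PySem.Dict.mk adj).contains c = true) →
    ∃ res',
      bfsLoop adj (cur.length + f) (cur.map (fun i => (i, e)) ++ acc.map (fun i => (i, e + 1))) res
        = bfsLoop adj f ((acc ++ lnews adj vis cur).map (fun i => (i, e + 1))) res'
      ∧ ResVis res' (vis ++ lnews adj vis cur)
      ∧ res'.values.sum = res.values.sum + (e + 1) * ((lnews adj vis cur).length : Int) := by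
  intro cur
  induction cur with
  | nil =>
    intro acc vis res e f hinv _ _
    exact ⟨res, by simp [lnews], by simpa [lnews] using hinv, by simp [lnews]⟩
  | cons c t ih =>
    intro acc vis res e f hinv he hc
    have hcc := hc c List.mem_cons_self
    rw [PySem.Dict.contains_eq_isSome_get?] at hcc
    obtain ⟨l, hl⟩ := Option.isSome_iff_exists.1 hcc
    have hag : aget adj c = l := by simp [aget, hl]
    obtain ⟨res₁, h1, h2, h3⟩ := innerA_eq l vis res
      (t.map (fun i => (i, e)) ++ acc.map (fun i => (i, e + 1))) e hinv (by omega)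
    have hstep : bfsLoop adj ((c :: t).length + f)
        ((c :: t).map (fun i => (i, e)) ++ acc.map (fun i => (i, e + 1))) res
        = bfsLoop adj (t.length + f)
            (t.map (fun i => (i, e)) ++ (acc ++ news vis l).map (fun i => (i, e + 1))) res₁ := by
      rw [show (c :: t).length + f = (t.length + f) + 1 from by simp [List.length_cons]; omega]
      simp only [List.map_cons, List.cons_append]
      rw [bfsLoop, hl]
      show bfsLoop adj (t.length + f) _ _ = _
      rw [h1]
      simp [List.map_append]
    obtain ⟨res', g1, g2, g3⟩ := ih (acc ++ news vis l) (vis ++ news vis l) res₁ e f h2 he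
      (fun c hc' => hc c (List.mem_cons_of_mem _ hc'))
    refine ⟨res', ?_, ?_, ?_⟩
    · rw [hstep, g1]
      simp only [lnews, hag, List.append_assoc]
    · simp only [lnews, hag]
      simpa [List.append_assoc] using g2
    · rw [g3, h3]
      simp only [lnews, hag, List.length_append]
      push_cast
      ring

theorem mainA_eq (adj : List (Int × List Int)) : ∀ (n : Nat) (R cur vis : List Int)
    (res : PySem.Dict Int Int) (e total : Int) (f g : Nat),
    ResVis res vis → (∀ c ∈ R, ∀ i ∈ aget adj c, i ∈ R) →
    (∀ i ∈ R, (PySem.Dict.mk adj).contains i = true) →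
    (∀ c ∈ cur, c ∈ R) → 1 ≤ e →
    uv adj vis ≤ n → cur.length + n ≤ f → n < g →
    total + e * (cur.length : Int) = res.values.sum →
    bfsLoop adj f (cur.map (fun i => (i, e))) res = altLoop adj g cur vis e total := by
  intro n
  induction n using Nat.strong_induction_on with
  | _ n ih =>
  intro R cur vis res e total f g hinv hclosedR hkeysR hcurR he hn hf hg htot
  have hc : ∀ c ∈ cur, (PySem.Dict.mk adj).contains c = true :=
    fun c hcm => hkeysR c (hcurR c hcm)
  cases cur with
  | nil =>
    have hs : res.values.sum = total := by
      simp only [List.length_nil, Int.natCast_zero, mul_zero, add_zero] at htot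
      omega
    cases f <;> cases g <;> simp [bfsLoop, altLoop, hs]
  | cons c t =>
    cases g with
    | zero => omega
    | succ g' =>
    obtain ⟨f', rfl⟩ : ∃ f', f = (c :: t).length + f' := ⟨f - (c :: t).length, by omega⟩
    obtain ⟨res', h1, h2, h3⟩ := levelA_eq adj (c :: t) [] vis res e f' hinv he hc
    simp only [List.map_nil, List.append_nil, List.nil_append] at h1 h2 h3
    rw [h1]
    have hstepB : altLoop adj (g' + 1) (c :: t) vis e total
        = altLoop adj g' (lnews adj vis (c :: t)) (vis ++ lnews adj vis (c :: t)) (e + 1)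
            (total + e * (((c :: t).length : Nat) : Int)) := by
      rw [altLoop, frontLoop_eq adj (c :: t) vis [] hc]
      simp
    rw [hstepB]
    have hdis : ∀ x ∈ lnews adj vis (c :: t), x ∉ vis :=
      fun x hx => (lnews_mem adj _ _ x hx).2
    have hnd := lnews_nodup adj (c :: t) vis
    have hflat : ∀ x ∈ lnews adj vis (c :: t), x ∈ (adj.map Prod.snd).flatten := by
      intro x hx
      obtain ⟨⟨c', _, hxa⟩, -⟩ := lnews_mem adj _ _ x hx
      rcases hg2 : (PySem.Dict.mk adj).get? c' with _ | l
      · simp [aget, hg2] at hxa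
      · exact List.mem_flatten.2 ⟨l, get?_mk_mem adj c' l hg2, by simpa [aget, hg2] using hxa⟩
    have hΔR : ∀ x ∈ lnews adj vis (c :: t), x ∈ R := by
      intro x hx
      obtain ⟨⟨c', hc', hxa⟩, -⟩ := lnews_mem adj _ _ x hx
      exact hclosedR c' (hcurR c' hc') x hxa
    have huv := uv_drop adj vis (lnews adj vis (c :: t)) hnd hdis hflat
    by_cases hΔe : lnews adj vis (c :: t) = []
    · have hsum : res'.values.sum = total + e * (((c :: t).length : Nat) : Int) := by
        rw [h3, hΔe]
        simp only [List.length_nil, Int.natCast_zero, mul_zero, add_zero]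
        omega
      rw [hΔe]
      cases f' <;> cases g' <;> simp [bfsLoop, altLoop, hsum]
    · have hΔpos : 1 ≤ (lnews adj vis (c :: t)).length :=
        List.length_pos_of_ne_nil hΔe
      have htot' : (total + e * (((c :: t).length : Nat) : Int))
          + (e + 1) * ((lnews adj vis (c :: t)).length : Int) = res'.values.sum := by
        rw [h3, ← htot]
      refine ih (n - (lnews adj vis (c :: t)).length) ?_
        R (lnews adj vis (c :: t)) (vis ++ lnews adj vis (c :: t)) res' (e + 1)
        (total + e * (((c :: t).length : Nat) : Int)) f' g'
        h2 hclosedR hkeysR hΔR ?_ ?_ ?_ ?_ htot' <;> omega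

theorem bfs_spec : Claim_equal_bfs := by
  intro adj root _ hpre
  unfold Spec_bfs bfs bfs_alt
  have hof : PySem.Set.ofList [root] = [root] :=
    PySem.Set.ofList_eq_self_of_nodup [root] (List.nodup_singleton root)
  rw [hof]
  have hres : ResVis ((PySem.Dict.empty).insert root 1) [root] := by
    intro j
    refine ⟨?_, ?_⟩
    · rw [PySem.Dict.contains_insert, PySem.Dict.contains_empty]
      by_cases hj : j = root
      · subst hj; simp
      · simp [hj]
    · intro hj
      have hj' : j = root := by simpa using hj
      subst hj'
      rw [PySem.Dict.getD_insert_self]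
      norm_num
  have hvals : ((PySem.Dict.empty : PySem.Dict Int Int).insert root 1).values.sum = 1 := by
    have h := PySem.Dict.items_insert_of_not_contains (PySem.Dict.empty (κ := Int) (ν := Int)) 1
      (PySem.Dict.contains_empty root)
    have hv : ((PySem.Dict.empty : PySem.Dict Int Int).insert root 1).values
        = List.map (fun x => x.2) ((PySem.Dict.empty : PySem.Dict Int Int).insert root 1).items := rfl
    rw [hv, h]
    simp [PySem.Dict.empty]
  have hkeysR : ∀ i ∈ reachSet adj root, (PySem.Dict.mk adj).contains i = true := by
    intro i hi
    rw [PySem.Dict.contains_iff_mem_keys, PySem.Dict.keys_mk]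
    simpa using hpre i hi
  have hcurR : ∀ c ∈ [root], c ∈ reachSet adj root := by
    intro c hcm
    rw [List.mem_singleton.1 hcm]
    exact root_mem_reachSet adj root
  have hnbound : uv adj [root] ≤ ((adj.map Prod.snd).flatten).length := by
    unfold uv
    exact le_trans (List.length_filter_le _ _) (PySem.Set.length_ofList_le _)
  have hmain := mainA_eq adj (uv adj [root]) (reachSet adj root) [root] [root]
    ((PySem.Dict.empty).insert root 1) 1 0
    (((adj.map Prod.snd).flatten).length + 1) (((adj.map Prod.snd).flatten).length + 1)
    hres (reachSet_closed adj root) hkeysR hcurR (le_refl 1) (le_refl _)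
    (by simp only [List.length_cons, List.length_nil]; omega) (by omega)
    (by simp [hvals])
  simpa using hmain
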